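-- pv_equiv track=rewrite | github.com/HwangJae-won/Coding_Test | 프로그래머스/lv1/92334. 신고 결과 받기/신고 결과 받기.py | solution
-- ===== SOURCE A (Python) =====
-- from collections import defaultdict
--
-- def solution(id_list, report, k):
--     answer = []
--     re =list(set(report)) #한 사람이 같은 사람 신고하면 삭제
--     user = defaultdict(set) #딕셔너리는 add를 활용하기 어려워 추가하면서 반복문 돌리기 어려웠음
--     cnt =defaultdict(int)
--     for i in re:
--         reporter=i.split(" ")[0]
--         error=i.split(" ")[1]
--         user[reporter].add(error)
--         cnt[error] +=1
--
--     for j in id_list: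
--         temp =0
--         for h in user[j]:
--             if cnt[h] >=k:#k번보다 신고 더 많이 당하면 강퇴
--                 temp+=1
--         answer.append(temp)
--     return answer
-- ===== SOURCE B (Python) =====
-- def solution(id_list, report, k):
--     # Dict-free brute force: dedupe reports, dedupe (reporter, target) pairs,
--     # then for each id count its pairs whose target was reported >= k times,
--     # recomputing each target's report count by a direct scan.
--     uniq = []
--     for r in report:
--         if r not in uniq:
--             uniq.append(r)
--     pairs = []
--     for s in uniq:
--         w = s.split(" ")
--         if (w[0], w[1]) not in pairs:
--             pairs.append((w[0], w[1]))
--     out = []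
--     for i in id_list:
--         n = 0
--         for rep, err in pairs:
--             if rep == i:
--                 c = 0
--                 for s in uniq:
--                     if s.split(" ")[1] == err:
--                         c += 1
--                 if c >= k:
--                     n += 1
--         out.append(n)
--     return out
-- ===== Notes on version B (the rewrite author's own statement) =====
-- stated objective: alternative
-- what changed: B drops A's defaultdict aggregation entirely: it dedupes reports and (reporter,target) pairs by linear membership scans and answers each id by brute force, recomputing every target's report count with a direct rescan of the deduped reports instead of maintaining any counting structure.
import Mathlib
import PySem

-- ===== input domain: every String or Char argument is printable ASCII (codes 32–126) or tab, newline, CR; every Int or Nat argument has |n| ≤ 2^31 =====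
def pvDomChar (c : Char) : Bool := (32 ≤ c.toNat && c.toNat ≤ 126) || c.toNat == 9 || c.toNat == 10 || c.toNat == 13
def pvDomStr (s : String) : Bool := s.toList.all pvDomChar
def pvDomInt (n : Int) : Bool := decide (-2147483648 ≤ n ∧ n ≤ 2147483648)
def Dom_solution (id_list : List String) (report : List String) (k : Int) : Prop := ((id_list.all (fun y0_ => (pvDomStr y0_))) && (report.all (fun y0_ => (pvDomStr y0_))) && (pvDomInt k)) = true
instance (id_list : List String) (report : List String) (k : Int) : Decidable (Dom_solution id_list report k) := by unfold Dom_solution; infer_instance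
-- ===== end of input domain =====

-- B is a dict-free brute-force rewrite: it dedupes reports and (reporter,target) pairs by
-- membership scans and recomputes each target's report count by rescanning; objective: alternative.

-- ===== PORT A =====
def solution (id_list : List String) (report : List String) (k : Int) : List Int :=
  let re : List String := PySem.Set.ofList report
  let uc := re.foldl
    (fun (st : PySem.Dict String (PySem.Set String) × PySem.Dict String Int) i =>
      let reporter := PySem.List.pyGetD ((PySem.Str.split? i " ").getD []) 0 ""
      let error := PySem.List.pyGetD ((PySem.Str.split? i " ").getD []) 1 ""
      (st.1.insert reporter (PySem.Set.add (st.1.getD reporter PySem.Set.empty) error),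
       st.2.modify error 0 (· + 1)))
    (PySem.Dict.empty, PySem.Dict.empty)
  id_list.foldl
    (fun answer j =>
      let temp := (uc.1.getD j PySem.Set.empty).foldl
        (fun temp h => if uc.2.getD h 0 ≥ k then temp + 1 else temp) 0
      answer ++ [temp]) []

-- ===== PORT B =====
def solution_alt (id_list : List String) (report : List String) (k : Int) : List Int :=
  let uniq : List String := report.foldl (fun acc r => if acc.contains r then acc else acc ++ [r]) []
  let pairs : List (String × String) := uniq.foldl
    (fun acc s =>
      let w := (PySem.Str.split? s " ").getD []
      let p := (PySem.List.pyGetD w 0 "", PySem.List.pyGetD w 1 "")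
      if acc.contains p then acc else acc ++ [p]) []
  id_list.foldl
    (fun out i =>
      let n := pairs.foldl
        (fun n p =>
          if p.1 = i then
            let c := uniq.foldl
              (fun c s => if PySem.List.pyGetD ((PySem.Str.split? s " ").getD []) 1 "" = p.2
                          then c + 1 else c) 0
            if c ≥ k then n + 1 else n
          else n) 0
      out ++ [n]) []

-- ===== PRECONDITION & SPEC =====
-- Pre_ excludes report strings with no space: s.split(" ")[1] raises IndexError in A (and in B).
def Pre_solution (id_list : List String) (report : List String) (k : Int) : Prop :=
  ∀ r ∈ report, 2 ≤ ((PySem.Str.split? r " ").getD []).length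
instance (id_list : List String) (report : List String) (k : Int) : Decidable (Pre_solution id_list report k) := by unfold Pre_solution; infer_instance
def pvWitness_solution : List String × List String × Int :=
  (["muzi", "frodo", "apeach"], ["muzi frodo", "apeach frodo", "muzi apeach"], 2)

def Spec_solution (id_list : List String) (report : List String) (k : Int) (out : List Int) : Prop := out = solution_alt id_list report k
instance (id_list : List String) (report : List String) (k : Int) (out : List Int) : Decidable (Spec_solution id_list report k out) := by unfold Spec_solution; infer_instance

-- ===== CLAIM (what is proved, stated in full; the proofs are below) =====
def Claim_equal_solution : Prop := ∀ (id_list : List String) (report : List String) (k : Int), Dom_solution id_list report k → Pre_solution id_list report k → Spec_solution id_list report k (solution id_list report k)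

-- ===== LEMMAS AND PROOFS =====

theorem user_fold (f g : String → String) (l : List String) (d : PySem.Dict String (PySem.Set String)) (j : String) :
    (List.foldl (fun d i => d.insert (f i) (PySem.Set.add (d.getD (f i) PySem.Set.empty) (g i))) d l).getD j PySem.Set.empty
    = List.foldl (fun acc s => PySem.Set.add acc (g s)) (d.getD j PySem.Set.empty) (l.filter (fun s => f s == j)) := by
  induction l generalizing d with
  | nil => rfl
  | cons i t ih =>
    simp only [List.foldl_cons, List.filter_cons]
    by_cases h : f i = j
    · subst h
      simp only [BEq.rfl, if_true, List.foldl_cons]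
      rw [ih, PySem.Dict.getD_insert_self]
    · have hb : (f i == j) = false := by simpa using h
      simp only [hb, Bool.false_eq_true, ih]
      rw [PySem.Dict.getD_insert]
      simp [Ne.symm h]

theorem perm_snd (f g : String → String) (l : List String) (j : String) :
    (PySem.Set.ofList ((l.filter (fun s => f s == j)).map g)).Perm
      (((PySem.Set.ofList (l.map (fun s => (f s, g s)))).filter (fun p => p.1 == j)).map Prod.snd) := by
  have h2 : (((PySem.Set.ofList (l.map (fun s => (f s, g s)))).filter (fun p => p.1 == j)).map Prod.snd).Nodup := by
    refine List.Nodup.map_on ?_ (List.Nodup.filter _ (PySem.Set.nodup_ofList _))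
    intro x hx y hy hxy
    have hx1 : x.1 = j := by simpa using (List.mem_filter.mp hx).2
    have hy1 : y.1 = j := by simpa using (List.mem_filter.mp hy).2
    exact Prod.ext (hx1.trans hy1.symm) hxy
  rw [List.perm_ext_iff_of_nodup (PySem.Set.nodup_ofList _) h2]
  intro e
  simp only [PySem.Set.mem_ofList, List.mem_map, List.mem_filter, PySem.Set.mem_ofList, beq_iff_eq]
  constructor
  · rintro ⟨s, ⟨hs, hfs⟩, hgs⟩
    exact ⟨(f s, g s), ⟨⟨s, hs, rfl⟩, hfs⟩, hgs⟩
  · rintro ⟨p, ⟨⟨s, hs, rfl⟩, h1⟩, h2⟩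
    exact ⟨s, ⟨hs, h1⟩, h2⟩

-- per-id value: A's fold over user[j] with cnt lookups = B's brute-force fold over the pair set
theorem main_count (f g : String → String) (l : List String) (k : Int) (j : String) :
    List.foldl (fun (t : Int) h => if (PySem.Dict.counter (l.map g)).getD h 0 ≥ k then t + 1 else t) 0
      ((List.foldl (fun d i => d.insert (f i) (PySem.Set.add (d.getD (f i) PySem.Set.empty) (g i))) PySem.Dict.empty l).getD j PySem.Set.empty)
    = (PySem.Set.ofList (l.map (fun s => (f s, g s)))).foldl
        (fun (n : Int) p =>
          if p.1 = j then
            if (l.foldl (fun (c : Int) s => if g s = p.2 then c + 1 else c) 0) ≥ k then n + 1 else n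
          else n) 0 := by
  set X := l.map g with hX
  set S := PySem.Set.ofList (l.map (fun s => (f s, g s))) with hS
  -- LHS: A's user[j] as a dedup of j's targets, then the fold as a countP
  rw [user_fold, PySem.Dict.getD_empty, ← List.foldl_map (f := g) (g := PySem.Set.add),
      show (PySem.Set.empty : PySem.Set String) = [] from rfl, ← PySem.Set.ofList_eq_foldl]
  rw [show (fun (t : Int) h => if (PySem.Dict.counter X).getD h 0 ≥ k then t + 1 else t)
        = (fun (t : Int) h => if (fun h => decide (k ≤ (X.count h : Int))) h = true then t + 1 else t) from by
      funext t h; simp [ge_iff_le, PySem.Dict.getD_counter]]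
  rw [PySem.List.foldl_count_if, zero_add]
  -- RHS: B's nested fold as a countP over the pair set
  have hrhs : S.foldl
        (fun (n : Int) p =>
          if p.1 = j then
            if (l.foldl (fun (c : Int) s => if g s = p.2 then c + 1 else c) 0) ≥ k then n + 1 else n
          else n) 0
      = (S.countP (fun p => (p.1 == j) && decide (k ≤ (X.count p.2 : Int))) : Int) := by
    have hc : ∀ e : String, l.foldl (fun (c : Int) s => if g s = e then c + 1 else c) 0 = (X.count e : Int) := by
      intro e
      rw [PySem.List.foldl_ite_add_one (p := fun s => g s = e), zero_add, hX,
          List.count_eq_countP, List.countP_map]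
      refine congrArg _ (List.countP_congr ?_)
      intro x _
      simp [Function.comp]
    have hfun : (fun (n : Int) (p : String × String) =>
          if p.1 = j then
            if (l.foldl (fun (c : Int) s => if g s = p.2 then c + 1 else c) 0) ≥ k then n + 1 else n
          else n)
        = (fun (n : Int) p => if ((p.1 == j) && decide (k ≤ (X.count p.2 : Int))) = true then n + 1 else n) := by
      funext n p
      rw [hc p.2]
      by_cases h1 : p.1 = j <;> by_cases h2 : k ≤ (X.count p.2 : Int) <;>
        simp [h1, h2, ge_iff_le]
    rw [hfun, PySem.List.foldl_count_if, zero_add]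
  rw [hrhs]
  -- both sides are countP over perm-related lists
  have := (perm_snd f g l j).countP_eq (fun e => decide (k ≤ (X.count e : Int)))
  rw [this]
  rw [List.countP_map, List.countP_filter, ← hS]
  refine congrArg _ (List.countP_congr ?_)
  intro p _
  simp [Function.comp, Bool.and_comm]

-- ===== VERDICT (by name: the statement is the Claim_ definition above) =====
theorem solution_spec : Claim_equal_solution := by
  intro id_list report k _hdom _hpre
  show solution id_list report k = solution_alt id_list report k
  simp only [solution, solution_alt]
  rw [PySem.List.foldl_prod_mk
      (f := fun (d : PySem.Dict String (PySem.Set String)) i =>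
        d.insert (PySem.List.pyGetD ((PySem.Str.split? i " ").getD []) 0 "")
          (PySem.Set.add (d.getD (PySem.List.pyGetD ((PySem.Str.split? i " ").getD []) 0 "") PySem.Set.empty)
            (PySem.List.pyGetD ((PySem.Str.split? i " ").getD []) 1 "")))
      (g := fun (d : PySem.Dict String Int) i =>
        d.modify (PySem.List.pyGetD ((PySem.Str.split? i " ").getD []) 1 "") 0 (· + 1))]
  -- B's dedup loops are Set.ofList
  have huniq : report.foldl (fun acc r => if acc.contains r then acc else acc ++ [r]) []
      = PySem.Set.ofList report := by
    rw [PySem.Set.ofList_eq_foldl]; rfl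
  have hpairs : ∀ u : List String, u.foldl
      (fun acc s =>
        let w := (PySem.Str.split? s " ").getD []
        let p := (PySem.List.pyGetD w 0 "", PySem.List.pyGetD w 1 "")
        if acc.contains p then acc else acc ++ [p]) []
      = PySem.Set.ofList (u.map (fun s =>
          (PySem.List.pyGetD ((PySem.Str.split? s " ").getD []) 0 "",
           PySem.List.pyGetD ((PySem.Str.split? s " ").getD []) 1 ""))) := by
    intro u
    have h1 : u.foldl (fun acc s => PySem.Set.add acc
          (PySem.List.pyGetD ((PySem.Str.split? s " ").getD []) 0 "",
           PySem.List.pyGetD ((PySem.Str.split? s " ").getD []) 1 "")) []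
        = PySem.Set.ofList (u.map (fun s =>
            (PySem.List.pyGetD ((PySem.Str.split? s " ").getD []) 0 "",
             PySem.List.pyGetD ((PySem.Str.split? s " ").getD []) 1 ""))) := by
      rw [PySem.Set.ofList_eq_foldl, List.foldl_map]
    exact h1
  rw [huniq, hpairs]
  -- A's cnt dict is a counter over the targets
  have hc : List.foldl (fun (d : PySem.Dict String Int) i =>
        d.modify (PySem.List.pyGetD ((PySem.Str.split? i " ").getD []) 1 "") 0 (· + 1))
        PySem.Dict.empty (PySem.Set.ofList report)
      = PySem.Dict.counter ((PySem.Set.ofList report).map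
          (fun s => PySem.List.pyGetD ((PySem.Str.split? s " ").getD []) 1 "")) := by
    unfold PySem.Dict.counter
    rw [List.foldl_map]
  rw [hc, PySem.List.foldl_append_singleton_eq_map, PySem.List.foldl_append_singleton_eq_map,
      List.nil_append, List.nil_append]
  refine List.map_congr_left ?_
  intro j _
  exact main_count (fun s => PySem.List.pyGetD ((PySem.Str.split? s " ").getD []) 0 "")
    (fun s => PySem.List.pyGetD ((PySem.Str.split? s " ").getD []) 1 "")
    (PySem.Set.ofList report) k j
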